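-- pv_equiv track=rewrite | github.com/chris78rey/colegios | desktop_app/colegios_desktop/batch_builder.py | build_group_key
-- ===== SOURCE A (Python) =====
-- def build_group_key(row: dict[str, str], row_index: int) -> str:
--     preferred_keys = [
--         "Cedula",
--         "AlumnoNombre",
--         "PrimerNombre",
--         "Email",
--     ]
--     for key in preferred_keys:
--         value = str(row.get(key, "")).strip()
--         if value:
--             return slugify(value)
--     return f"registro-{row_index + 1:04d}"
--
-- def slugify(value: str) -> str:
--     cleaned = "".join(ch.lower() if ch.isalnum() else "-" for ch in value.strip())
--     while "--" in cleaned: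
--         cleaned = cleaned.replace("--", "-")
--     return cleaned.strip("-") or "item"
-- ===== SOURCE B (Python) =====
-- def slugify(value: str) -> str:
--     # tokenize the alphanumeric runs instead of collapsing dashes in a loop
--     tokens = "".join(ch.lower() if ch.isalnum() else " " for ch in value).split()
--     return "-".join(tokens) or "item"
--
-- def build_group_key(row: dict[str, str], row_index: int) -> str:
--     preferred_keys = [
--         "Cedula",
--         "AlumnoNombre",
--         "PrimerNombre",
--         "Email",
--     ]
--     for key in preferred_keys:
--         value = str(row.get(key, "")).strip()
--         if value:
--             return slugify(value)
--     return f"registro-{row_index + 1:04d}"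
-- ===== Notes on version B (the rewrite author's own statement) =====
-- stated objective: idiomatic
-- what changed: slugify is rewritten to map non-alphanumeric characters to spaces and tokenize with str.split(), joining the alnum runs with '-', which removes A's '--'-collapsing while loop and the strip('-') pass.
import Mathlib
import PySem

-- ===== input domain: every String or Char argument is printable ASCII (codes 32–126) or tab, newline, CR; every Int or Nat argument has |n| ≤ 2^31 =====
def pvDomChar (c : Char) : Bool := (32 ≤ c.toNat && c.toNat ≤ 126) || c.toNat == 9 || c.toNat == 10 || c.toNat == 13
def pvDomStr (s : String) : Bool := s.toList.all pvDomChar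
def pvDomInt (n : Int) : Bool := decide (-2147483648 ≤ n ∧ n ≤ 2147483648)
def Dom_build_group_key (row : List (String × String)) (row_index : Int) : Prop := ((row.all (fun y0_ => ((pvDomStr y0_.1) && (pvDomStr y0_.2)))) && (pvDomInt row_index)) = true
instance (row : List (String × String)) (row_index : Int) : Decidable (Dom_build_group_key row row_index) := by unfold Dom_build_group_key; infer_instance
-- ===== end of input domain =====

-- B rewrites slugify to tokenize the alphanumeric runs (map non-alnum chars to spaces, split,
-- join with '-') instead of A's dash-mapping followed by a '--'-collapsing while loop and strip('-').

-- ===== PORT A =====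

-- One pass of `cleaned.replace("--", "-")`, written structurally.  It and the lemmas below are
-- only here (above the port) because the port's while loop cites them for termination.
def pvRep : List Char → List Char
  | '-' :: '-' :: t => '-' :: pvRep t
  | c :: t => c :: pvRep t
  | [] => []

theorem pvRep_cons {c : Char} {t : List Char} (h : ¬(c = '-' ∧ ∃ t', t = '-' :: t')) :
    pvRep (c :: t) = c :: pvRep t := by
  rw [pvRep.eq_def]
  split
  · rename_i t' heq
    injection heq with h1 h2
    exact absurd ⟨h1, t', h2⟩ h
  · rename_i c' t' hno heq
    injection heq with h1 h2
    rw [h1, h2]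
  · rename_i heq; simp at heq

theorem pvRep_length_le (l : List Char) : (pvRep l).length ≤ l.length := by
  fun_induction pvRep l <;> simp_all
  all_goals omega

theorem pvRep_length_lt (l : List Char) (h : ['-', '-'] <:+: l) :
    (pvRep l).length < l.length := by
  fun_induction pvRep l with
  | case1 t ih =>
      have := pvRep_length_le t
      simp only [List.length_cons]
      omega
  | case2 c t hno ih =>
      rcases (List.infix_cons_iff).1 h with hp | hi
      · exfalso
        obtain ⟨r, hr⟩ := hp
        simp only [List.cons_append, List.nil_append] at hr
        injection hr with h1 h2
        exact hno r h1.symm h2.symm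
      · have := ih hi
        simp only [List.length_cons]
        omega
  | case3 => simp at h

theorem pvReplaceGo_spec (fuel : Nat) (l acc : List Char) (h : l.length ≤ fuel) :
    PySem.Chars.replace.go ['-', '-'] ['-'] fuel l acc = acc.reverse ++ pvRep l := by
  induction fuel generalizing l acc with
  | zero =>
      have hl : l = [] := by cases l <;> simp_all
      subst hl
      rw [PySem.Chars.replace.go.eq_def]
      simp [pvRep]
  | succ n ih =>
      cases l with
      | nil => rw [PySem.Chars.replace.go.eq_def]; simp [pvRep]
      | cons c t =>
          rw [PySem.Chars.replace.go.eq_def]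
          by_cases hp : List.isPrefixOf ['-', '-'] (c :: t) = true
          · obtain ⟨r, hr⟩ := List.isPrefixOf_iff_prefix.mp hp
            simp only [List.cons_append, List.nil_append] at hr
            injection hr with h1 h2
            subst h1
            subst h2
            simp only [hp, if_true]
            rw [show List.drop ((['-', '-'] : List Char).length) ('-' :: '-' :: r) = r from rfl]
            rw [ih r _ (by simp at h ⊢; omega)]
            simp [pvRep]
          · simp only [hp, if_false, Bool.false_eq_true]
            rw [ih t (c :: acc) (by simp at h ⊢; omega)]
            rw [pvRep_cons]
            · simp
            · rintro ⟨rfl, t', rfl⟩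
              simp [List.isPrefixOf] at hp

theorem pvReplace_spec (l : List Char) :
    PySem.Chars.replace l ['-', '-'] ['-'] = pvRep l := by
  unfold PySem.Chars.replace
  simp only [List.isEmpty_cons, if_false, Bool.false_eq_true]
  exact pvReplaceGo_spec l.length l [] (le_refl _)

-- the `while "--" in cleaned:` loop of A's slugify
def pySlugCollapse_A (cleaned : String) : String :=
  if PySem.Str.isIn "--" cleaned then
    pySlugCollapse_A (PySem.Str.replace cleaned "--" "-")
  else cleaned
termination_by cleaned.toList.length
decreasing_by
  rename_i h
  simp only [PySem.Str.replace, PySem.Str.isIn] at *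
  rw [String.toList_ofList]
  show (PySem.Chars.replace cleaned.toList "--".toList "-".toList).length < _
  have hin : ("--".toList) <:+: cleaned.toList := (PySem.Chars.isIn_iff_infix _ _).1 h
  rw [show ("--".toList) = ['-', '-'] from rfl, show ("-".toList) = ['-'] from rfl] at *
  rw [pvReplace_spec]
  exact pvRep_length_lt _ hin

def pySlugify_A (value : String) : String :=
  let cleaned := String.ofList ((PySem.Str.strip value).toList.map
    (fun ch => if PySem.Chars.isalnum ch then PySem.Chars.lowerChar ch else '-'))
  let collapsed := pySlugCollapse_A cleaned
  let r := PySem.Str.stripChars collapsed "-"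
  if r = "" then "item" else r

def pyBGKGo_A (row : List (String × String)) (row_index : Int) : List String → String
  | [] => "registro-" ++ PySem.Str.zfill (PySem.Int.toStr (row_index + 1)) 4
  | k :: ks =>
      let value := PySem.Str.strip (PySem.Dict.getD (PySem.Dict.mk row) k "")
      if value = "" then pyBGKGo_A row row_index ks else pySlugify_A value

def build_group_key (row : List (String × String)) (row_index : Int) : String :=
  pyBGKGo_A row row_index ["Cedula", "AlumnoNombre", "PrimerNombre", "Email"]

-- ===== PORT B =====

def pySlugify_B (value : String) : String :=
  let tokens := PySem.Str.split₀ (String.ofList (value.toList.map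
    (fun ch => if PySem.Chars.isalnum ch then PySem.Chars.lowerChar ch else ' ')))
  let j := PySem.Str.join "-" tokens
  if j = "" then "item" else j

def pyBGKGo_B (row : List (String × String)) (row_index : Int) : List String → String
  | [] => "registro-" ++ PySem.Str.zfill (PySem.Int.toStr (row_index + 1)) 4
  | k :: ks =>
      let value := PySem.Str.strip (PySem.Dict.getD (PySem.Dict.mk row) k "")
      if value = "" then pyBGKGo_B row row_index ks else pySlugify_B value

def build_group_key_alt (row : List (String × String)) (row_index : Int) : String :=
  pyBGKGo_B row row_index ["Cedula", "AlumnoNombre", "PrimerNombre", "Email"]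

-- ===== PRECONDITION & SPEC =====
def Spec_build_group_key (row : List (String × String)) (row_index : Int) (out : String) : Prop := out = build_group_key_alt row row_index
instance (row : List (String × String)) (row_index : Int) (out : String) : Decidable (Spec_build_group_key row row_index out) := by unfold Spec_build_group_key; infer_instance

-- ===== CLAIM (what is proved, stated in full; the proofs are below) =====
def Claim_equal_build_group_key : Prop := ∀ (row : List (String × String)) (row_index : Int), Dom_build_group_key row row_index → Spec_build_group_key row row_index (build_group_key row row_index)

-- ===== LEMMAS AND PROOFS =====

-- abbreviations used in the proofs only
def pvP (c : Char) : Bool := PySem.Chars.isalnum c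
def pvF (c : Char) : Char := if PySem.Chars.isalnum c then PySem.Chars.lowerChar c else '-'
def pvG (c : Char) : Char := if PySem.Chars.isalnum c then PySem.Chars.lowerChar c else ' '
def pvD (c : Char) : Bool := (['-'] : List Char).contains c

-- collapse every run of dashes to a single dash
def pvDdup : List Char → List Char
  | [] => []
  | c :: t => if c = '-' ∧ t.head? = some '-' then pvDdup t else c :: pvDdup t

-- the (lowered) maximal alphanumeric runs of a list
def pvToks : List Char → List (List Char)
  | [] => []
  | c :: t =>
    if pvP c then
      ((c :: t).takeWhile pvP).map PySem.Chars.lowerChar :: pvToks ((c :: t).dropWhile pvP)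
    else pvToks t
termination_by l => l.length
decreasing_by
  all_goals simp_all
  exact List.length_dropWhile_le pvP t

def pvT (l : List Char) : List Char := PySem.Chars.join ['-'] (pvToks l)

def pvRstrip (z : List Char) : List Char := (List.dropWhile pvD z.reverse).reverse

def pvA (l : List Char) : List Char := PySem.Chars.stripChars (pvDdup (l.map pvF)) ['-']

-- character-level facts
theorem pv_lower_range {c : Char} (h : PySem.Chars.isalnum c = true) :
    (48 ≤ (PySem.Chars.lowerChar c).toNat ∧ (PySem.Chars.lowerChar c).toNat ≤ 57) ∨
    (97 ≤ (PySem.Chars.lowerChar c).toNat ∧ (PySem.Chars.lowerChar c).toNat ≤ 122) := by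
  have hn : ∀ d : Char, d.val.toNat = d.toNat := fun _ => rfl
  have hlit : 'A'.toNat = 65 ∧ 'Z'.toNat = 90 ∧ 'a'.toNat = 97 ∧ 'z'.toNat = 122 ∧
      '0'.toNat = 48 ∧ '9'.toNat = 57 := ⟨rfl, rfl, rfl, rfl, rfl, rfl⟩
  simp only [PySem.Chars.isalnum, PySem.Chars.isalpha, PySem.Chars.isdigit, PySem.Chars.isupper,
    PySem.Chars.islower, Bool.or_eq_true, Bool.and_eq_true, decide_eq_true_eq, Char.le_def,
    UInt32.le_iff_toNat_le, hn, hlit.1, hlit.2.1, hlit.2.2.1, hlit.2.2.2.1, hlit.2.2.2.2.1,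
    hlit.2.2.2.2.2] at h
  unfold PySem.Chars.lowerChar
  split
  · rename_i hu
    simp only [PySem.Chars.isupper, Bool.and_eq_true, decide_eq_true_eq, Char.le_def,
      UInt32.le_iff_toNat_le, hn, hlit.1, hlit.2.1] at hu
    rw [Char.toNat_ofNat, if_pos (Or.inl (by omega))]
    omega
  · rename_i hu
    simp only [PySem.Chars.isupper, Bool.and_eq_true, decide_eq_true_eq, Char.le_def,
      UInt32.le_iff_toNat_le, hn, hlit.1, hlit.2.1] at hu
    omega

theorem pv_lower_ne_dash {c : Char} (h : PySem.Chars.isalnum c = true) :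
    PySem.Chars.lowerChar c ≠ '-' := by
  intro he
  have := congrArg Char.toNat he
  rw [show ('-').toNat = 45 from rfl] at this
  rcases pv_lower_range h with ⟨h1, h2⟩ | ⟨h1, h2⟩ <;> omega

theorem pv_lower_not_space {c : Char} (h : PySem.Chars.isalnum c = true) :
    PySem.Chars.isspace (PySem.Chars.lowerChar c) = false := by
  unfold PySem.Chars.isspace
  rcases pv_lower_range h with ⟨h1, h2⟩ | ⟨h1, h2⟩ <;>
    · simp only [Bool.or_eq_false_iff, Bool.and_eq_false_iff, decide_eq_false_iff_not]
      omega

-- pvDdup facts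
theorem pvRep_head? (l : List Char) : (pvRep l).head? = l.head? := by
  fun_induction pvRep l <;> simp

theorem pvDdup_rep (l : List Char) : pvDdup (pvRep l) = pvDdup l := by
  fun_induction pvRep l with
  | case1 t ih =>
      show pvDdup ('-' :: pvRep t) = _
      by_cases h : t.head? = some '-' <;>
        simp [pvDdup, pvRep_head?, h, ih]
  | case2 c t hno ih =>
      by_cases hc : c = '-' ∧ t.head? = some '-'
      · exfalso
        obtain ⟨rfl, hh⟩ := hc
        cases t with
        | nil => simp at hh
        | cons x t' =>
            simp only [List.head?_cons, Option.some.injEq] at hh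
            exact hno t' rfl (by rw [hh])
      · simp only [pvDdup, pvRep_head?]
        rw [if_neg hc, if_neg hc, ih]
  | case3 => rfl

theorem pvDdup_self (l : List Char) (h : ¬ (['-', '-'] <:+: l)) : pvDdup l = l := by
  induction l with
  | nil => rfl
  | cons c t ih =>
      have hc : ¬ (c = '-' ∧ t.head? = some '-') := by
        rintro ⟨rfl, hh⟩
        cases t with
        | nil => simp at hh
        | cons x t' =>
            simp only [List.head?_cons, Option.some.injEq] at hh
            exact h (List.infix_cons_iff.2 (Or.inl ⟨t', by subst hh; rfl⟩))
      simp only [pvDdup]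
      rw [if_neg hc, ih (fun hi => h (List.infix_cons hi))]

theorem pvCollapse_eq_ddup (s : String) : (pySlugCollapse_A s).toList = pvDdup s.toList := by
  generalize hn : s.toList.length = n
  induction n using Nat.strong_induction_on generalizing s with
  | _ n ih =>
  rw [pySlugCollapse_A]
  by_cases hin : PySem.Str.isIn "--" s = true
  · rw [if_pos hin]
    have harg : (PySem.Str.replace s "--" "-").toList = pvRep s.toList := by
      simp only [PySem.Str.replace, String.toList_ofList]
      rw [show ("--".toList) = ['-', '-'] from rfl, show ("-".toList) = ['-'] from rfl]
      exact pvReplace_spec _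
    have hinfix : ['-', '-'] <:+: s.toList := by
      simp only [PySem.Str.isIn] at hin
      rw [show ("--".toList) = ['-', '-'] from rfl] at hin
      exact (PySem.Chars.isIn_iff_infix _ _).1 hin
    rw [ih ((PySem.Str.replace s "--" "-").toList.length)
          (by rw [harg]; rw [← hn]; exact pvRep_length_lt _ hinfix) _ rfl]
    rw [harg, pvDdup_rep]
  · rw [if_neg hin]
    symm
    apply pvDdup_self
    intro hcon
    apply hin
    simp only [PySem.Str.isIn]
    rw [show ("--".toList) = ['-', '-'] from rfl]
    exact (PySem.Chars.isIn_iff_infix _ _).2 hcon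

-- B side: split₀ of the space-mapped list yields exactly the lowered runs
theorem pvSplitGo_spec (l : List Char) (cur : List Char) (acc : List (List Char)) :
    PySem.Chars.split₀.go (l.map pvG) cur acc =
      acc.reverse ++ (if cur = [] then pvToks l
        else (cur.reverse ++ (l.takeWhile pvP).map PySem.Chars.lowerChar) ::
          pvToks (l.dropWhile pvP)) := by
  induction l generalizing cur acc with
  | nil =>
      rw [List.map_nil]
      rw [show PySem.Chars.split₀.go [] cur acc
            = (if cur.isEmpty = true then acc.reverse else (cur.reverse :: acc).reverse) from rfl]
      by_cases hc : cur = []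
      · subst hc; simp [pvToks]
      · rw [if_neg (by simpa using hc), if_neg hc]
        simp [pvToks]
  | cons c t ih =>
      rw [List.map_cons]
      rw [show PySem.Chars.split₀.go (pvG c :: List.map pvG t) cur acc
            = (if PySem.Chars.isspace (pvG c) = true then
                (if cur.isEmpty = true then PySem.Chars.split₀.go (List.map pvG t) [] acc
                 else PySem.Chars.split₀.go (List.map pvG t) [] (cur.reverse :: acc))
               else PySem.Chars.split₀.go (List.map pvG t) (pvG c :: cur) acc) from rfl]
      by_cases hp : pvP c = true
      · have hg : pvG c = PySem.Chars.lowerChar c := by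
          unfold pvG; rw [if_pos (by simpa [pvP] using hp)]
        have hsp : PySem.Chars.isspace (pvG c) = false := by
          rw [hg]; exact pv_lower_not_space (by simpa [pvP] using hp)
        rw [hsp]
        simp only [Bool.false_eq_true, if_false]
        rw [ih (pvG c :: cur) acc]
        rw [if_neg (by simp)]
        rw [List.takeWhile_cons_of_pos hp, List.dropWhile_cons_of_pos hp]
        by_cases hc : cur = []
        · subst hc
          rw [if_pos rfl]
          rw [pvToks, if_pos hp]
          rw [List.takeWhile_cons_of_pos hp, List.dropWhile_cons_of_pos hp]
          simp [hg]
        · rw [if_neg hc]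
          simp [hg]
      · have hg : pvG c = ' ' := by
          unfold pvG; rw [if_neg (by simpa [pvP] using hp)]
        have hsp : PySem.Chars.isspace (pvG c) = true := by rw [hg]; decide
        rw [hsp]
        simp only [if_true]
        have htoks : pvToks (c :: t) = pvToks t := by
          rw [pvToks.eq_def]; simp [hp]
        by_cases hc : cur = []
        · subst hc
          simp only [List.isEmpty_nil, if_true]
          rw [ih [] acc]
          simp [htoks]
        · rw [if_neg (by simpa using hc)]
          rw [ih [] (cur.reverse :: acc)]
          rw [if_neg hc]
          rw [List.takeWhile_cons_of_neg (by simpa using hp),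
              List.dropWhile_cons_of_neg (by simpa using hp)]
          simp [htoks]

theorem pvSplit_eq_toks (l : List Char) :
    PySem.Chars.split₀ (l.map pvG) = pvToks l := by
  have := pvSplitGo_spec l [] []
  simpa [PySem.Chars.split₀] using this

-- helpers about dashes
theorem pvD_dash : pvD '-' = true := by decide

theorem pvD_false_of_ne {c : Char} (h : c ≠ '-') : pvD c = false := by
  simp [pvD, h]

theorem pvStripChars_eq (s : List Char) :
    PySem.Chars.stripChars s ['-'] = pvRstrip (List.dropWhile pvD s) := rfl

theorem pvDropWhile_eq_self {l : List Char} (h : ∀ c ∈ l, pvD c = false) :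
    List.dropWhile pvD l = l := by
  cases l with
  | nil => rfl
  | cons c t => exact List.dropWhile_cons_of_neg (by simp [h c (by simp)])

theorem pvLsd_cons (x : List Char) :
    List.dropWhile pvD (pvDdup ('-' :: x)) = List.dropWhile pvD (pvDdup x) := by
  simp only [pvDdup]
  by_cases h : x.head? = some '-'
  · simp [h]
  · rw [if_neg (by simp [h])]
    exact List.dropWhile_cons_of_pos pvD_dash

theorem pvDdup_append_nodash (a x : List Char) (h : ∀ c ∈ a, c ≠ '-') :
    pvDdup (a ++ x) = a ++ pvDdup x := by
  induction a with
  | nil => rfl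
  | cons c a' ih =>
      simp only [List.cons_append, pvDdup]
      rw [if_neg (by rintro ⟨rfl, _⟩; exact h '-' (by simp) rfl)]
      rw [ih (fun d hd => h d (by simp [hd]))]

theorem pvRstrip_append (a z : List Char) (h : ∀ c ∈ a, pvD c = false) :
    pvRstrip (a ++ z) = a ++ pvRstrip z := by
  unfold pvRstrip
  rw [List.reverse_append, List.dropWhile_append]
  by_cases he : (List.dropWhile pvD z.reverse).isEmpty = true
  · rw [if_pos he]
    rw [pvDropWhile_eq_self (fun c hc => h c (by simpa using hc))]
    rw [List.isEmpty_iff] at he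
    simp [he]
  · rw [if_neg he]
    simp [List.reverse_append]

theorem pvRstrip_dash_cons (x : List Char) :
    pvRstrip ('-' :: x) = if pvRstrip x = [] then [] else '-' :: pvRstrip x := by
  unfold pvRstrip
  rw [show ('-' :: x).reverse = x.reverse ++ ['-'] from by simp]
  rw [List.dropWhile_append]
  by_cases he : (List.dropWhile pvD x.reverse).isEmpty = true
  · rw [if_pos he]
    rw [List.isEmpty_iff] at he
    rw [List.dropWhile_cons_of_pos pvD_dash]
    simp [he]
  · rw [if_neg he]
    rw [List.isEmpty_iff] at he
    rw [if_neg (by simpa using he)]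
    simp

theorem pvDdup_dash (w : List Char) :
    pvDdup ('-' :: w) = '-' :: pvDdup (List.dropWhile pvD w) := by
  induction w with
  | nil => rfl
  | cons c w' ih =>
      by_cases hc : c = '-'
      · subst hc
        have h1 : pvDdup ('-' :: '-' :: w') = pvDdup ('-' :: w') := by
          rw [pvDdup.eq_def]
          simp
        rw [h1, ih, List.dropWhile_cons_of_pos pvD_dash]
      · rw [show pvDdup ('-' :: c :: w') = '-' :: pvDdup (c :: w') from by
            rw [pvDdup.eq_def]
            simp [hc]]
        rw [List.dropWhile_cons_of_neg (by simp [pvD_false_of_ne hc])]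

theorem pvLsd_of_head (x : List Char) (h : ∀ c, x.head? = some c → pvD c = false) :
    List.dropWhile pvD (pvDdup x) = pvDdup x := by
  cases x with
  | nil => rfl
  | cons c t =>
      have hc : pvD c = false := h c rfl
      have hne : c ≠ '-' := by intro he; rw [he, pvD_dash] at hc; simp at hc
      simp only [pvDdup]
      rw [if_neg (by rintro ⟨rfl, _⟩; exact hne rfl)]
      exact List.dropWhile_cons_of_neg (by simp [hc])

theorem pvDropWhile_head {p : Char → Bool} {l t : List Char} {c : Char}
    (h : List.dropWhile p l = c :: t) : p c = false := by
  induction l with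
  | nil => simp at h
  | cons a s ih =>
      by_cases ha : p a = true
      · rw [List.dropWhile_cons_of_pos ha] at h; exact ih h
      · rw [List.dropWhile_cons_of_neg ha] at h
        injection h with h1 _
        subst h1
        simpa using ha

theorem pvJoin_cons (a : List Char) (r : List (List Char)) :
    PySem.Chars.join ['-'] (a :: r) =
      a ++ (if r = [] then [] else '-' :: PySem.Chars.join ['-'] r) := by
  cases r with
  | nil => simp [PySem.Chars.join, List.intercalate]
  | cons b r' => simp [PySem.Chars.join, List.intercalate]

theorem pvToks_ne_nil (l : List Char) : ∀ tk ∈ pvToks l, tk ≠ [] := by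
  generalize hn : l.length = n
  induction n using Nat.strong_induction_on generalizing l with
  | _ n ih =>
  cases l with
  | nil => simp [pvToks]
  | cons c t =>
      intro tk htk
      rw [pvToks] at htk
      by_cases hp : pvP c = true
      · rw [if_pos hp] at htk
        rcases List.mem_cons.1 htk with h | h
        · subst h
          rw [List.takeWhile_cons_of_pos hp]
          simp
        · refine ih ((c :: t).dropWhile pvP).length ?_ _ rfl tk h
          rw [List.dropWhile_cons_of_pos hp, ← hn]
          have := List.length_dropWhile_le pvP t
          simp only [List.length_cons]
          omega
      · rw [if_neg hp] at htk
        exact ih t.length (by rw [← hn]; simp) t rfl tk htk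

theorem pvT_eq_nil_iff (l : List Char) : pvT l = [] ↔ pvToks l = [] := by
  unfold pvT
  cases h : pvToks l with
  | nil => simp [PySem.Chars.join, List.intercalate]
  | cons a r =>
      rw [pvJoin_cons]
      have ha : a ≠ [] := pvToks_ne_nil l a (by rw [h]; simp)
      constructor
      · intro hh
        rcases List.append_eq_nil_iff.1 hh with ⟨h1, _⟩
        exact absurd h1 ha
      · intro hh; simp at hh

-- A side: collapse + strip('-') of the dash-mapped list is the dash-join of the runs
theorem pvA_core (l : List Char) : pvA l = pvT l := by
  generalize hn : l.length = n
  induction n using Nat.strong_induction_on generalizing l with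
  | _ n ih =>
  cases l with
  | nil => simp [pvA, pvT, pvToks, pvDdup, PySem.Chars.stripChars, PySem.Chars.join,
      List.intercalate]
  | cons c t =>
      unfold pvA
      rw [pvStripChars_eq]
      by_cases hp : pvP c = true
      · have hane : ((c :: t).takeWhile pvP).map PySem.Chars.lowerChar ≠ [] := by
          rw [List.takeWhile_cons_of_pos hp]; simp
        have hand : ∀ x ∈ ((c :: t).takeWhile pvP).map PySem.Chars.lowerChar, pvD x = false := by
          intro x hx
          obtain ⟨y, hy, rfl⟩ := List.mem_map.1 hx
          have hyp : pvP y = true := List.mem_takeWhile_imp hy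
          exact pvD_false_of_ne (pv_lower_ne_dash (by simpa [pvP] using hyp))
        have hand' : ∀ x ∈ ((c :: t).takeWhile pvP).map PySem.Chars.lowerChar, x ≠ '-' := by
          intro x hx heq
          have := hand x hx
          rw [heq, pvD_dash] at this
          simp at this
        have hmap : (c :: t).map pvF
            = ((c :: t).takeWhile pvP).map PySem.Chars.lowerChar
              ++ ((c :: t).dropWhile pvP).map pvF := by
          conv_lhs => rw [← List.takeWhile_append_dropWhile (p := pvP) (l := c :: t)]
          rw [List.map_append]
          congr 1
          apply List.map_congr_left
          intro x hx
          have hyp : pvP x = true := List.mem_takeWhile_imp hx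
          unfold pvF
          rw [if_pos (by simpa [pvP] using hyp)]
        rw [hmap, pvDdup_append_nodash _ _ hand']
        rw [show List.dropWhile pvD (((c :: t).takeWhile pvP).map PySem.Chars.lowerChar
              ++ pvDdup (((c :: t).dropWhile pvP).map pvF))
            = ((c :: t).takeWhile pvP).map PySem.Chars.lowerChar
              ++ pvDdup (((c :: t).dropWhile pvP).map pvF) from by
          cases hcase : ((c :: t).takeWhile pvP).map PySem.Chars.lowerChar with
          | nil => exact absurd hcase hane
          | cons a as =>
              rw [List.cons_append]
              refine List.dropWhile_cons_of_neg ?_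
              have := hand a (by rw [hcase]; simp)
              simp [this]]
        rw [pvRstrip_append _ _ hand]
        have hTrhs : pvT (c :: t)
            = ((c :: t).takeWhile pvP).map PySem.Chars.lowerChar
              ++ (if pvToks ((c :: t).dropWhile pvP) = [] then []
                  else '-' :: pvT ((c :: t).dropWhile pvP)) := by
          unfold pvT
          rw [pvToks, if_pos hp, pvJoin_cons]
        rw [hTrhs]
        congr 1
        have hlen : ((c :: t).dropWhile pvP).length < n := by
          rw [List.dropWhile_cons_of_pos hp, ← hn]
          have := List.length_dropWhile_le pvP t
          simp only [List.length_cons]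
          omega
        have hih : pvA ((c :: t).dropWhile pvP) = pvT ((c :: t).dropWhile pvP) :=
          ih _ hlen _ rfl
        cases hrest : (c :: t).dropWhile pvP with
        | nil => simp [pvRstrip, pvDdup, pvToks]
        | cons c' t' =>
            have hpc' : pvP c' = false := pvDropWhile_head hrest
            have hfc' : pvF c' = '-' := by
              unfold pvF
              rw [if_neg (by simpa [pvP] using hpc')]
            have hhead : ∀ d, (List.dropWhile pvD (t'.map pvF)).head? = some d → pvD d = false := by
              intro d hd
              cases hq : List.dropWhile pvD (t'.map pvF) with
              | nil => rw [hq] at hd; simp at hd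
              | cons a b =>
                  rw [hq] at hd
                  injection hd with h1
                  subst h1
                  exact pvDropWhile_head hq
            have hX : pvA (c' :: t') = pvRstrip (pvDdup (List.dropWhile pvD (t'.map pvF))) := by
              unfold pvA
              rw [pvStripChars_eq, List.map_cons, hfc', pvDdup_dash]
              rw [List.dropWhile_cons_of_pos pvD_dash]
              rw [pvLsd_of_head _ hhead]
            rw [List.map_cons, hfc', pvDdup_dash, pvRstrip_dash_cons]
            rw [← hX]
            rw [hrest] at hih
            rw [hih]
            by_cases hz : pvToks (c' :: t') = []
            · rw [if_pos hz, if_pos ((pvT_eq_nil_iff _).2 hz)]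
            · rw [if_neg hz, if_neg (fun hh => hz ((pvT_eq_nil_iff _).1 hh))]
      · have hfc : pvF c = '-' := by
          unfold pvF
          rw [if_neg (by simpa [pvP] using hp)]
        rw [List.map_cons, hfc, pvLsd_cons, ← pvStripChars_eq]
        have hih : pvA t = pvT t := ih t.length (by rw [← hn]; simp) t rfl
        unfold pvA at hih
        rw [hih]
        unfold pvT
        rw [show pvToks (c :: t) = pvToks t from by rw [pvToks, if_neg hp]]

theorem pvDropWhile_idem (p : Char → Bool) (l : List Char) :
    List.dropWhile p (List.dropWhile p l) = List.dropWhile p l := by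
  induction l with
  | nil => rfl
  | cons c t ih =>
      by_cases h : p c = true
      · rw [List.dropWhile_cons_of_pos h, ih]
      · rw [List.dropWhile_cons_of_neg h, List.dropWhile_cons_of_neg h]

theorem pvStrip_idem (l : List Char) :
    PySem.Chars.strip (PySem.Chars.strip l) = PySem.Chars.strip l := by
  unfold PySem.Chars.strip PySem.Chars.rstrip PySem.Chars.lstrip
  set sp := PySem.Chars.isspace with hsp
  set y := List.dropWhile sp l with hy
  have hz1 : List.dropWhile sp ((List.dropWhile sp y.reverse).reverse)
      = (List.dropWhile sp y.reverse).reverse := by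
    cases hzc : (List.dropWhile sp y.reverse).reverse with
    | nil => rfl
    | cons c w =>
        have hy2 : y = (List.dropWhile sp y.reverse).reverse
            ++ (List.takeWhile sp y.reverse).reverse := by
          conv_lhs => rw [← List.reverse_reverse y,
            ← List.takeWhile_append_dropWhile (p := sp) (l := y.reverse)]
          rw [List.reverse_append]
        rw [hzc] at hy2
        have hc : sp c = false := pvDropWhile_head (p := sp) (l := l)
          (show List.dropWhile sp l = c :: (w ++ (List.takeWhile sp y.reverse).reverse) from by
            rw [← hy]; simpa using hy2)
        exact List.dropWhile_cons_of_neg (by simp [hc])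
  rw [hz1, List.reverse_reverse, pvDropWhile_idem]

theorem pvSlugify_eq (v : String) (h : PySem.Chars.strip v.toList = v.toList) :
    pySlugify_A v = pySlugify_B v := by
  have hstr : (PySem.Str.strip v).toList = v.toList := by
    simp [PySem.Str.strip, h]
  have hFeq : (fun ch => if PySem.Chars.isalnum ch then PySem.Chars.lowerChar ch else '-') = pvF :=
    rfl
  have hGeq : (fun ch => if PySem.Chars.isalnum ch then PySem.Chars.lowerChar ch else ' ') = pvG :=
    rfl
  have hr : PySem.Str.stripChars
      (pySlugCollapse_A (String.ofList ((PySem.Str.strip v).toList.map pvF))) "-"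
      = String.ofList (pvT v.toList) := by
    simp only [PySem.Str.stripChars]
    congr 1
    rw [pvCollapse_eq_ddup, String.toList_ofList, hstr]
    rw [show ("-".toList) = ['-'] from rfl]
    exact pvA_core v.toList
  have hj : PySem.Str.join "-" (PySem.Str.split₀ (String.ofList (v.toList.map pvG)))
      = String.ofList (pvT v.toList) := by
    simp only [PySem.Str.split₀, PySem.Str.join, String.toList_ofList]
    rw [pvSplit_eq_toks]
    congr 1
    rw [List.map_map]
    rw [show (String.toList ∘ String.ofList) = id from by
      funext x; exact String.toList_ofList]
    rw [List.map_id]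
    rfl
  simp only [pySlugify_A, pySlugify_B, hFeq, hGeq]
  rw [hr, hj]

theorem pvGo_eq (row : List (String × String)) (row_index : Int) (ks : List String) :
    pyBGKGo_A row row_index ks = pyBGKGo_B row row_index ks := by
  induction ks with
  | nil => rfl
  | cons k ks ih =>
      simp only [pyBGKGo_A, pyBGKGo_B]
      split
      · exact ih
      · apply pvSlugify_eq
        rw [PySem.Str.strip, String.toList_ofList]
        exact pvStrip_idem _

-- ===== VERDICT (by name: the statement is the Claim_ definition above) =====
theorem build_group_key_spec : Claim_equal_build_group_key := by
  intro row row_index _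
  show build_group_key row row_index = build_group_key_alt row row_index
  exact pvGo_eq row row_index _
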